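-- pv_equiv track=rewrite | github.com/mmarchetti90/project_setup_assistant | src/manager/manager.py | gathering_code_generation
-- ===== SOURCE A (Python) =====
-- def gathering_code_generation(
--     code_dir: str,
--     manifest: list[str],
--     scopes: list[str],
--     descriptions: list[str]
-- ) -> str:
--
--     # Init shell script
--
--     shell_script = [
--         '#!/bin/bash',
--         'work_dir=$(pwd)'
--     ]
--
--     # Define directories and subdirectories to be created and transfer instructions
--
--     output_dir = 'useful_code'
--
--     shell_script.append(f'rm -r {output_dir}')
--
--     mkdir_commands, cp_commands = [], []
--
--     for (code, scope_of_work, description, location) in manifest: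
--
--         # Only gather code if scope in scopes and description in descriptions
--
--         matching_scopes = [sow for sow in scope_of_work.split('; ') if sow in scopes]
--
--         if len(matching_scopes) and description in descriptions:
--
--             # Define mkdir command
--
--             output_subdir = '_'.join(matching_scopes)
--
--             full_output_path = f'{output_dir}/{output_subdir}'.replace(' ', '_')
--
--             new_mkdir_command = f'mkdir -p {full_output_path}'
--
--             if new_mkdir_command not in mkdir_commands:
--
--                 mkdir_commands.append(new_mkdir_command)
--
--             # Define copy command
--
--             if location.lower() == 'local':
--
--                 new_cp_command = f'cp {code_dir}/{code} {full_output_path}/'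
--
--             elif location.startswith('git@github.com'):
--
--                 new_cp_command = f'cd {full_output_path}\n' + f'git clone {location}' + '\ncd ${work_dir}'
--
--             else:
--
--                 continue
--
--             if new_cp_command not in cp_commands:
--
--                 cp_commands.append(new_cp_command)
--
--     # Assemble shell script
--
--     shell_script += (
--         [""] +
--         mkdir_commands +
--         [""] +
--         cp_commands +
--         [""]
--     )
--
--     shell_script = "\n".join(shell_script)
--
--     return shell_script
-- ===== SOURCE B (Python) =====
-- def gathering_code_generation(code_dir, manifest, scopes, descriptions):
--     # Pass 1: collect matched records as (code, full_output_path, location)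
--     matched = []
--     for (code, scope_of_work, description, location) in manifest:
--         matching_scopes = [s for s in scope_of_work.split('; ') if s in scopes]
--         if matching_scopes and description in descriptions:
--             path = ('useful_code/' + '_'.join(matching_scopes)).replace(' ', '_')
--             matched.append((code, path, location))
--     # Pass 2: mkdir commands, deduped in first-occurrence order (for every match)
--     mkdir_commands = []
--     for (_, path, _) in matched:
--         cmd = 'mkdir -p ' + path
--         if cmd not in mkdir_commands:
--             mkdir_commands.append(cmd)
--     # Pass 3: copy commands, only for valid locations, deduped independently
--     cp_commands = []
--     for (code, path, location) in matched:
--         if location.lower() == 'local':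
--             cmd = f'cp {code_dir}/{code} {path}/'
--         elif location.startswith('git@github.com'):
--             cmd = f'cd {path}\ngit clone {location}\ncd ${{work_dir}}'
--         else:
--             continue
--         if cmd not in cp_commands:
--             cp_commands.append(cmd)
--     return '\n'.join(['#!/bin/bash', 'work_dir=$(pwd)', 'rm -r useful_code', '']
--                      + mkdir_commands + [''] + cp_commands + [''])
-- ===== Notes on version B (the rewrite author's own statement) =====
-- stated objective: alternative
-- what changed: A builds mkdir and cp command lists together in one accumulating loop over the manifest; B first collects an intermediate list of matched records (code, output path, location) and then derives the deduped mkdir commands and the deduped cp commands in two separate passes over that list.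
import Mathlib
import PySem

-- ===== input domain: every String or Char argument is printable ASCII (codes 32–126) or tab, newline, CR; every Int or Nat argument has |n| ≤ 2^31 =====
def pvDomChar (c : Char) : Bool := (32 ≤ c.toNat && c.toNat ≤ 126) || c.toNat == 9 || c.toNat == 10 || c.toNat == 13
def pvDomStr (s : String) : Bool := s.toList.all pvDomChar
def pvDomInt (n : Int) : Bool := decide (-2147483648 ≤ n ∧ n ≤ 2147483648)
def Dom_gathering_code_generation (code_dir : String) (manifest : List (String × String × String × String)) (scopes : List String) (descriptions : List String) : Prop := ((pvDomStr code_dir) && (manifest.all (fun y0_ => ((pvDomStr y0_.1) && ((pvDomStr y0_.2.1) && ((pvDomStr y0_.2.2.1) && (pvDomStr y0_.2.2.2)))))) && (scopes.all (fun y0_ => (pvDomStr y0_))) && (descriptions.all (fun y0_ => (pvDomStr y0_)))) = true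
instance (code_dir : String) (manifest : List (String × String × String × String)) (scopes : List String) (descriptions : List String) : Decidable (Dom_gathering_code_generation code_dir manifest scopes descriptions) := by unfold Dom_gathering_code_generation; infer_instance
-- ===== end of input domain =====

-- B re-decomposes A's single accumulating loop into three passes (match, mkdir, cp) over an
-- intermediate list of matched records; same output ('alternative' objective, no speed claim).

-- ===== PORT A =====
-- matching_scopes of both A and B = [sow for sow in scope_of_work.split('; ') if sow in scopes]
-- ('; ' is a non-empty literal separator, so split is ported exactly via PySem.Chars.splitOn)
def pvMatching (scopes : List String) (sow : String) : List String :=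
  ((PySem.Chars.splitOn sow.toList "; ".toList).map String.ofList).filter (fun s => scopes.contains s)

-- A's loop body: one step of the manifest loop, updating (mkdir_commands, cp_commands)
def pvStepA (code_dir : String) (scopes descriptions : List String)
    (st : List String × List String) (item : String × String × String × String) :
    List String × List String :=
  if ((pvMatching scopes item.2.1).length != 0) && descriptions.contains item.2.2.1 then
    if PySem.Str.lower item.2.2.2 == "local" then
      ((if st.1.contains ("mkdir -p " ++ PySem.Str.replace ("useful_code" ++ ("/" ++ PySem.Str.join "_" (pvMatching scopes item.2.1))) " " "_") then st.1
        else st.1 ++ ["mkdir -p " ++ PySem.Str.replace ("useful_code" ++ ("/" ++ PySem.Str.join "_" (pvMatching scopes item.2.1))) " " "_"]),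
       (if st.2.contains ("cp " ++ (code_dir ++ ("/" ++ (item.1 ++ (" " ++ (PySem.Str.replace ("useful_code" ++ ("/" ++ PySem.Str.join "_" (pvMatching scopes item.2.1))) " " "_" ++ "/")))))) then st.2
        else st.2 ++ ["cp " ++ (code_dir ++ ("/" ++ (item.1 ++ (" " ++ (PySem.Str.replace ("useful_code" ++ ("/" ++ PySem.Str.join "_" (pvMatching scopes item.2.1))) " " "_" ++ "/")))))]))
    else if PySem.Str.startswith item.2.2.2 "git@github.com" then
      ((if st.1.contains ("mkdir -p " ++ PySem.Str.replace ("useful_code" ++ ("/" ++ PySem.Str.join "_" (pvMatching scopes item.2.1))) " " "_") then st.1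
        else st.1 ++ ["mkdir -p " ++ PySem.Str.replace ("useful_code" ++ ("/" ++ PySem.Str.join "_" (pvMatching scopes item.2.1))) " " "_"]),
       (if st.2.contains (("cd " ++ (PySem.Str.replace ("useful_code" ++ ("/" ++ PySem.Str.join "_" (pvMatching scopes item.2.1))) " " "_" ++ "\n")) ++ ("git clone " ++ item.2.2.2) ++ "\ncd ${work_dir}") then st.2
        else st.2 ++ [("cd " ++ (PySem.Str.replace ("useful_code" ++ ("/" ++ PySem.Str.join "_" (pvMatching scopes item.2.1))) " " "_" ++ "\n")) ++ ("git clone " ++ item.2.2.2) ++ "\ncd ${work_dir}"]))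
    else
      ((if st.1.contains ("mkdir -p " ++ PySem.Str.replace ("useful_code" ++ ("/" ++ PySem.Str.join "_" (pvMatching scopes item.2.1))) " " "_") then st.1
        else st.1 ++ ["mkdir -p " ++ PySem.Str.replace ("useful_code" ++ ("/" ++ PySem.Str.join "_" (pvMatching scopes item.2.1))) " " "_"]),
       st.2)
  else st

def gathering_code_generation (code_dir : String) (manifest : List (String × String × String × String)) (scopes : List String) (descriptions : List String) : String :=
  PySem.Str.join "\n"
    ((["#!/bin/bash", "work_dir=$(pwd)", "rm -r " ++ "useful_code"]) ++ [""]
      ++ (manifest.foldl (pvStepA code_dir scopes descriptions) ([], [])).1 ++ [""]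
      ++ (manifest.foldl (pvStepA code_dir scopes descriptions) ([], [])).2 ++ [""])

-- ===== PORT B =====
-- B's matching_scopes is the same comprehension as A's, so the helper is shared.

-- B pass 1 step: append the matched record (code, full_output_path, location)
def pvMatchedStep (scopes descriptions : List String)
    (acc : List (String × String × String)) (item : String × String × String × String) :
    List (String × String × String) :=
  if ((pvMatching scopes item.2.1).length != 0) && descriptions.contains item.2.2.1 then
    acc ++ [(item.1, PySem.Str.replace ("useful_code/" ++ PySem.Str.join "_" (pvMatching scopes item.2.1)) " " "_", item.2.2.2)]
  else acc

-- B pass 2 step: dedup-append the mkdir command of one matched record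
def pvMkStep (mk : List String) (r : String × String × String) : List String :=
  if mk.contains ("mkdir -p " ++ r.2.1) then mk else mk ++ ["mkdir -p " ++ r.2.1]

-- B pass 3 step: dedup-append the copy command, only for valid locations
def pvCpStep (code_dir : String) (cp : List String) (r : String × String × String) : List String :=
  if PySem.Str.lower r.2.2 == "local" then
    if cp.contains ("cp " ++ (code_dir ++ ("/" ++ (r.1 ++ (" " ++ (r.2.1 ++ "/")))))) then cp
    else cp ++ ["cp " ++ (code_dir ++ ("/" ++ (r.1 ++ (" " ++ (r.2.1 ++ "/")))))]
  else if PySem.Str.startswith r.2.2 "git@github.com" then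
    if cp.contains (("cd " ++ (r.2.1 ++ "\n")) ++ ("git clone " ++ r.2.2) ++ "\ncd ${work_dir}") then cp
    else cp ++ [("cd " ++ (r.2.1 ++ "\n")) ++ ("git clone " ++ r.2.2) ++ "\ncd ${work_dir}"]
  else cp

def gathering_code_generation_alt (code_dir : String) (manifest : List (String × String × String × String)) (scopes : List String) (descriptions : List String) : String :=
  PySem.Str.join "\n"
    ((["#!/bin/bash", "work_dir=$(pwd)", "rm -r useful_code", ""])
      ++ (manifest.foldl (pvMatchedStep scopes descriptions) []).foldl pvMkStep [] ++ [""]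
      ++ (manifest.foldl (pvMatchedStep scopes descriptions) []).foldl (pvCpStep code_dir) [] ++ [""])

-- ===== PRECONDITION & SPEC =====
def Spec_gathering_code_generation (code_dir : String) (manifest : List (String × String × String × String)) (scopes : List String) (descriptions : List String) (out : String) : Prop := out = gathering_code_generation_alt code_dir manifest scopes descriptions
instance (code_dir : String) (manifest : List (String × String × String × String)) (scopes : List String) (descriptions : List String) (out : String) : Decidable (Spec_gathering_code_generation code_dir manifest scopes descriptions out) := by unfold Spec_gathering_code_generation; infer_instance

-- ===== CLAIM (what is proved, stated in full; the proofs are below) =====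
def Claim_equal_gathering_code_generation : Prop := ∀ (code_dir : String) (manifest : List (String × String × String × String)) (scopes : List String) (descriptions : List String), Dom_gathering_code_generation code_dir manifest scopes descriptions → Spec_gathering_code_generation code_dir manifest scopes descriptions (gathering_code_generation code_dir manifest scopes descriptions)

-- ===== LEMMAS AND PROOFS =====

-- the matched record(s) produced by one manifest item: [] when it does not match
def pvRec (scopes descriptions : List String) (item : String × String × String × String) :
    List (String × String × String) :=
  if ((pvMatching scopes item.2.1).length != 0) && descriptions.contains item.2.2.1 then
    [(item.1, PySem.Str.replace ("useful_code/" ++ PySem.Str.join "_" (pvMatching scopes item.2.1)) " " "_", item.2.2.2)]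
  else []

lemma pvPath_eq (s : String) :
    "useful_code" ++ ("/" ++ s) = "useful_code/" ++ s := by
  rw [← String.append_assoc,
    show ("useful_code" ++ "/" : String) = "useful_code/" from by decide]

lemma pvMatchedStep_eq (scopes descriptions : List String)
    (acc : List (String × String × String)) (item : String × String × String × String) :
    pvMatchedStep scopes descriptions acc item = acc ++ pvRec scopes descriptions item := by
  unfold pvMatchedStep pvRec
  split_ifs <;> simp

lemma pvMatched_flatMap (scopes descriptions : List String) :
    ∀ (ms : List (String × String × String × String)) (acc : List (String × String × String)),
      ms.foldl (pvMatchedStep scopes descriptions) acc = acc ++ ms.flatMap (pvRec scopes descriptions) := by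
  intro ms
  induction ms with
  | nil => simp
  | cons x xs ih =>
    intro acc
    simp [List.foldl_cons, pvMatchedStep_eq, ih, List.append_assoc]

lemma pvStepA_match (code_dir : String) (scopes descriptions : List String)
    (st : List String × List String) (item : String × String × String × String) :
    pvStepA code_dir scopes descriptions st item
      = ((pvRec scopes descriptions item).foldl pvMkStep st.1,
         (pvRec scopes descriptions item).foldl (pvCpStep code_dir) st.2) := by
  unfold pvStepA pvRec pvMatching
  rw [pvPath_eq]
  by_cases h : (((((PySem.Chars.splitOn item.2.1.toList "; ".toList).map String.ofList).filter
        (fun s => scopes.contains s)).length != 0) && descriptions.contains item.2.2.1) = true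
  · simp only [if_pos h, List.foldl_cons, List.foldl_nil]
    unfold pvMkStep pvCpStep
    split_ifs <;> rfl
  · simp only [if_neg h, List.foldl_nil]

lemma pvLoop_split (code_dir : String) (scopes descriptions : List String) :
    ∀ (ms : List (String × String × String × String)) (mk cp : List String),
      ms.foldl (pvStepA code_dir scopes descriptions) (mk, cp)
        = ((ms.flatMap (pvRec scopes descriptions)).foldl pvMkStep mk,
           (ms.flatMap (pvRec scopes descriptions)).foldl (pvCpStep code_dir) cp) := by
  intro ms
  induction ms with
  | nil => simp
  | cons x xs ih =>
    intro mk cp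
    rw [List.foldl_cons, pvStepA_match, List.flatMap_cons, List.foldl_append, List.foldl_append]
    exact ih _ _

-- ===== VERDICT (by name: the statement is the Claim_ definition above) =====
theorem gathering_code_generation_spec : Claim_equal_gathering_code_generation := by
  intro code_dir manifest scopes descriptions _
  show gathering_code_generation code_dir manifest scopes descriptions = _
  unfold gathering_code_generation gathering_code_generation_alt
  rw [pvLoop_split, pvMatched_flatMap]
  simp only [List.nil_append]
  rw [show ("rm -r " ++ "useful_code" : String) = "rm -r useful_code" from by decide]
  simp
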